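-- pv_equiv track=rewrite | github.com/RodrigoGarcia43/discrete-math-problems | 1- Returning Home/src/brute.py | search_for_instants
-- ===== SOURCE A (Python) =====
-- def search_for_instants(n, x, y, instant_positions):
--     result = []
--     _y = y
--     while _y <= n:
--         _y += 1
--         if (x, _y) in instant_positions:
--             result.append((x, _y))
--
--     _y = y
--     while _y >= 0:
--         _y -= 1
--         if (x, _y) in instant_positions:
--             result.append((x, _y))
--
--     _x = x
--     while _x <= n:
--         _x += 1
--         if (_x, y) in instant_positions:
--             result.append((_x, y))
--
--     _x = x
--     while _x >= 0:
--         _x -= 1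
--         if (_x, y) in instant_positions:
--             result.append((_x, y))
--
--     return result
-- ===== SOURCE B (Python) =====
-- def search_for_instants(n, x, y, instant_positions):
--     pts = set(instant_positions)
--     col_up = sorted(py for px, py in pts if px == x and y < py <= n + 1)
--     col_down = list(reversed(sorted(py for px, py in pts if px == x and -1 <= py < y)))
--     row_up = sorted(px for px, py in pts if py == y and x < px <= n + 1)
--     row_down = list(reversed(sorted(px for px, py in pts if py == y and -1 <= px < x)))
--     return ([(x, py) for py in col_up] + [(x, py) for py in col_down]
--             + [(px, y) for px in row_up] + [(px, y) for px in row_down])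
-- ===== Notes on version B (the rewrite author's own statement) =====
-- stated objective: faster
-- what changed: Instead of scanning every grid cell in the four directions and testing list membership per cell, B makes one pass over the (deduplicated) known positions, partitions them into the four directional buckets by coordinate comparisons, and sorts each bucket to reproduce the outward scan order.
import Mathlib
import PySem

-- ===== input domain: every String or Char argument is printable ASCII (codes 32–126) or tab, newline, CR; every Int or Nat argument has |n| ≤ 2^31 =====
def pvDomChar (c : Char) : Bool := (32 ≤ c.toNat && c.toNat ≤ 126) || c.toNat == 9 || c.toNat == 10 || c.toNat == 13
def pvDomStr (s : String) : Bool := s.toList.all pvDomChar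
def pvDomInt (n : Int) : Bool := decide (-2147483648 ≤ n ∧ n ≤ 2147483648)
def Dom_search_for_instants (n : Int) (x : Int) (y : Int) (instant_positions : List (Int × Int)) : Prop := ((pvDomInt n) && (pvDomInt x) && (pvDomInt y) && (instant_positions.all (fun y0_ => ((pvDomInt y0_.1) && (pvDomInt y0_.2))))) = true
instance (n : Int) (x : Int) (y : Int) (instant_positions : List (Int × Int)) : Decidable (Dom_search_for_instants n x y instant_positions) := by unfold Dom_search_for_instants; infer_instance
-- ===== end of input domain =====

-- B replaces A's cell-by-cell grid scan in four directions by a single partition of the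
-- deduplicated known positions into four buckets, sorted to reproduce the outward order (faster).


-- ===== PORT A =====
-- while _y <= n: _y += 1; if (x, _y) in instant_positions: result.append((x, _y))
def sfiUpY (n x : Int) (ips : List (Int × Int)) (res : List (Int × Int)) (_y : Int) :
    List (Int × Int) :=
  if _y ≤ n then
    sfiUpY n x ips (if (x, _y + 1) ∈ ips then res ++ [(x, _y + 1)] else res) (_y + 1)
  else res
termination_by (n + 1 - _y).toNat
decreasing_by omega

-- while _y >= 0: _y -= 1; if (x, _y) in instant_positions: …
def sfiDownY (x : Int) (ips : List (Int × Int)) (res : List (Int × Int)) (_y : Int) :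
    List (Int × Int) :=
  if 0 ≤ _y then
    sfiDownY x ips (if (x, _y - 1) ∈ ips then res ++ [(x, _y - 1)] else res) (_y - 1)
  else res
termination_by (_y + 1).toNat
decreasing_by omega

-- while _x <= n: _x += 1; if (_x, y) in instant_positions: …
def sfiUpX (n y : Int) (ips : List (Int × Int)) (res : List (Int × Int)) (_x : Int) :
    List (Int × Int) :=
  if _x ≤ n then
    sfiUpX n y ips (if (_x + 1, y) ∈ ips then res ++ [(_x + 1, y)] else res) (_x + 1)
  else res
termination_by (n + 1 - _x).toNat
decreasing_by omega

-- while _x >= 0: _x -= 1; if (_x, y) in instant_positions: …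
def sfiDownX (y : Int) (ips : List (Int × Int)) (res : List (Int × Int)) (_x : Int) :
    List (Int × Int) :=
  if 0 ≤ _x then
    sfiDownX y ips (if (_x - 1, y) ∈ ips then res ++ [(_x - 1, y)] else res) (_x - 1)
  else res
termination_by (_x + 1).toNat
decreasing_by omega

def search_for_instants (n : Int) (x : Int) (y : Int) (instant_positions : List (Int × Int)) : List (Int × Int) :=
  let r1 := sfiUpY n x instant_positions [] y
  let r2 := sfiDownY x instant_positions r1 y
  let r3 := sfiUpX n y instant_positions r2 x
  sfiDownX y instant_positions r3 x

-- ===== PORT B =====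
def search_for_instants_alt (n : Int) (x : Int) (y : Int) (instant_positions : List (Int × Int)) : List (Int × Int) :=
  let pts : PySem.Set (Int × Int) := PySem.Set.ofList instant_positions
  let colUp := PySem.List.sorted
    ((pts.filter (fun p => p.1 == x && decide (y < p.2) && decide (p.2 ≤ n + 1))).map (·.2))
    (fun v => v) false
  let colDown := (PySem.List.sorted
    ((pts.filter (fun p => p.1 == x && decide (-1 ≤ p.2) && decide (p.2 < y))).map (·.2))
    (fun v => v) false).reverse
  let rowUp := PySem.List.sorted
    ((pts.filter (fun p => p.2 == y && decide (x < p.1) && decide (p.1 ≤ n + 1))).map (·.1))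
    (fun v => v) false
  let rowDown := (PySem.List.sorted
    ((pts.filter (fun p => p.2 == y && decide (-1 ≤ p.1) && decide (p.1 < x))).map (·.1))
    (fun v => v) false).reverse
  colUp.map (fun v => (x, v)) ++ colDown.map (fun v => (x, v))
    ++ rowUp.map (fun v => (v, y)) ++ rowDown.map (fun v => (v, y))

-- ===== PRECONDITION & SPEC =====
def Spec_search_for_instants (n : Int) (x : Int) (y : Int) (instant_positions : List (Int × Int)) (out : List (Int × Int)) : Prop := out = search_for_instants_alt n x y instant_positions
instance (n : Int) (x : Int) (y : Int) (instant_positions : List (Int × Int)) (out : List (Int × Int)) : Decidable (Spec_search_for_instants n x y instant_positions out) := by unfold Spec_search_for_instants; infer_instance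

-- ===== CLAIM (what is proved, stated in full; the proofs are below) =====
def Claim_equal_search_for_instants : Prop := ∀ (n : Int) (x : Int) (y : Int) (instant_positions : List (Int × Int)), Dom_search_for_instants n x y instant_positions → Spec_search_for_instants n x y instant_positions (search_for_instants n x y instant_positions)

-- ===== LEMMAS AND PROOFS =====

-- B's sorted bucket equals the ascending range filtered by membership in ips.
theorem sorted_filter_eq (ips : List (Int × Int)) (lo hi : Int)
    (mk : Int → Int × Int) (e : Int × Int → Int) (hme : ∀ v, e (mk v) = v)
    (cond : Int × Int → Bool)
    (hcond : ∀ p, cond p = true ↔ ∃ v, p = mk v ∧ lo ≤ v ∧ v < hi) :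
    PySem.List.sorted (((PySem.Set.ofList ips).filter cond).map e) (fun v => v) false
      = (PySem.List.pyRange lo hi 1).filter (fun v => decide (mk v ∈ ips)) := by
  apply PySem.List.sorted_eq_of_perm_of_pairwise_lt
  · -- permutation: both nodup, same membership
    have hnd1 : ((PySem.Set.ofList ips).filter cond).Nodup :=
      (PySem.Set.nodup_ofList ips).filter _
    have hnd2 : (((PySem.Set.ofList ips).filter cond).map e).Nodup := by
      refine List.Nodup.map_on ?_ hnd1
      intro p hp q hq hpq
      obtain ⟨vp, hvp, _⟩ := (hcond p).mp (List.of_mem_filter hp)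
      obtain ⟨vq, hvq, _⟩ := (hcond q).mp (List.of_mem_filter hq)
      subst hvp; subst hvq
      rw [hme, hme] at hpq
      rw [hpq]
    have hnd3 : ((PySem.List.pyRange lo hi 1).filter (fun v => decide (mk v ∈ ips))).Nodup :=
      (PySem.List.nodup_pyRange_one lo hi).filter _
    rw [List.perm_ext_iff_of_nodup hnd3 hnd2]
    intro v
    simp only [List.mem_filter, List.mem_map, PySem.List.mem_pyRange_one, decide_eq_true_eq]
    constructor
    · rintro ⟨⟨hlo, hhi⟩, hmem⟩
      refine ⟨mk v, ⟨?_, ?_⟩, hme v⟩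
      · exact (PySem.Set.mem_ofList _ _).mpr hmem
      · exact (hcond _).mpr ⟨v, rfl, hlo, hhi⟩
    · rintro ⟨p, ⟨hp, hc⟩, hev⟩
      obtain ⟨w, hw, hlo, hhi⟩ := (hcond p).mp hc
      subst hw
      rw [hme] at hev
      subst hev
      exact ⟨⟨hlo, hhi⟩, (PySem.Set.mem_ofList _ _).mp hp⟩
  · exact (PySem.List.pairwise_lt_pyRange_one lo hi).filter _

-- A's four while-loops produce the filtered ranges, outward order.
theorem sfiUpY_eq (n x : Int) (ips : List (Int × Int)) :
    ∀ fuel : Nat, ∀ (res : List (Int × Int)) (_y : Int), fuel = (n + 1 - _y).toNat →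
    sfiUpY n x ips res _y
      = res ++ ((PySem.List.pyRange (_y + 1) (n + 2) 1).filter
          (fun v => decide ((x, v) ∈ ips))).map (fun v => (x, v)) := by
  intro fuel
  induction fuel with
  | zero =>
    intro res _y hf
    rw [sfiUpY]
    rw [if_neg (by omega), PySem.List.pyRange_one_eq_nil (by omega)]
    simp
  | succ k ih =>
    intro res _y hf
    rw [sfiUpY]
    rw [if_pos (by omega), PySem.List.pyRange_one_cons (by omega)]
    rw [ih _ (_y + 1) (by omega)]
    by_cases h : (x, _y + 1) ∈ ips
    · simp [h]
    · simp [h]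

theorem sfiDownY_eq (x : Int) (ips : List (Int × Int)) :
    ∀ fuel : Nat, ∀ (res : List (Int × Int)) (_y : Int), fuel = (_y + 1).toNat →
    sfiDownY x ips res _y
      = res ++ ((PySem.List.pyRange (_y - 1) (-2) (-1)).filter
          (fun v => decide ((x, v) ∈ ips))).map (fun v => (x, v)) := by
  intro fuel
  induction fuel with
  | zero =>
    intro res _y hf
    rw [sfiDownY]
    rw [if_neg (by omega), PySem.List.pyRange_neg_one_eq_nil (by omega)]
    simp
  | succ k ih =>
    intro res _y hf
    rw [sfiDownY]
    rw [if_pos (by omega), PySem.List.pyRange_neg_one_cons (by omega)]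
    rw [ih _ (_y - 1) (by omega)]
    by_cases h : (x, _y - 1) ∈ ips
    · simp [h]
    · simp [h]

theorem sfiUpX_eq (n y : Int) (ips : List (Int × Int)) :
    ∀ fuel : Nat, ∀ (res : List (Int × Int)) (_x : Int), fuel = (n + 1 - _x).toNat →
    sfiUpX n y ips res _x
      = res ++ ((PySem.List.pyRange (_x + 1) (n + 2) 1).filter
          (fun v => decide ((v, y) ∈ ips))).map (fun v => (v, y)) := by
  intro fuel
  induction fuel with
  | zero =>
    intro res _x hf
    rw [sfiUpX]
    rw [if_neg (by omega), PySem.List.pyRange_one_eq_nil (by omega)]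
    simp
  | succ k ih =>
    intro res _x hf
    rw [sfiUpX]
    rw [if_pos (by omega), PySem.List.pyRange_one_cons (by omega)]
    rw [ih _ (_x + 1) (by omega)]
    by_cases h : (_x + 1, y) ∈ ips
    · simp [h]
    · simp [h]

theorem sfiDownX_eq (y : Int) (ips : List (Int × Int)) :
    ∀ fuel : Nat, ∀ (res : List (Int × Int)) (_x : Int), fuel = (_x + 1).toNat →
    sfiDownX y ips res _x
      = res ++ ((PySem.List.pyRange (_x - 1) (-2) (-1)).filter
          (fun v => decide ((v, y) ∈ ips))).map (fun v => (v, y)) := by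
  intro fuel
  induction fuel with
  | zero =>
    intro res _x hf
    rw [sfiDownX]
    rw [if_neg (by omega), PySem.List.pyRange_neg_one_eq_nil (by omega)]
    simp
  | succ k ih =>
    intro res _x hf
    rw [sfiDownX]
    rw [if_pos (by omega), PySem.List.pyRange_neg_one_cons (by omega)]
    rw [ih _ (_x - 1) (by omega)]
    by_cases h : (_x - 1, y) ∈ ips
    · simp [h]
    · simp [h]

-- ===== VERDICT (by name: the statement is the Claim_ definition above) =====
theorem search_for_instants_spec : Claim_equal_search_for_instants := by
  intro n x y ips _hdom
  unfold Spec_search_for_instants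
  simp only [search_for_instants, search_for_instants_alt]
  rw [sfiUpY_eq n x ips _ [] y rfl, sfiDownY_eq x ips _ _ y rfl,
      sfiUpX_eq n y ips _ _ x rfl, sfiDownX_eq y ips _ _ x rfl]
  rw [sorted_filter_eq ips (y + 1) (n + 2) (fun v => (x, v)) (·.2) (fun _ => rfl) _
        (by intro p; cases p with | mk a b =>
              simp only [beq_iff_eq, Bool.and_eq_true, decide_eq_true_eq]
              constructor
              · rintro ⟨⟨h1, h2⟩, h3⟩; exact ⟨b, by simp [h1], by omega, by omega⟩
              · rintro ⟨v, hv, h1, h2⟩; simp at hv; obtain ⟨ha, hb⟩ := hv; subst ha; subst hb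
                exact ⟨⟨rfl, by omega⟩, by omega⟩),
      sorted_filter_eq ips (-1) y (fun v => (x, v)) (·.2) (fun _ => rfl) _
        (by intro p; cases p with | mk a b =>
              simp only [beq_iff_eq, Bool.and_eq_true, decide_eq_true_eq]
              constructor
              · rintro ⟨⟨h1, h2⟩, h3⟩; exact ⟨b, by simp [h1], by omega, by omega⟩
              · rintro ⟨v, hv, h1, h2⟩; simp at hv; obtain ⟨ha, hb⟩ := hv; subst ha; subst hb
                exact ⟨⟨rfl, by omega⟩, by omega⟩),
      sorted_filter_eq ips (x + 1) (n + 2) (fun v => (v, y)) (·.1) (fun _ => rfl) _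
        (by intro p; cases p with | mk a b =>
              simp only [beq_iff_eq, Bool.and_eq_true, decide_eq_true_eq]
              constructor
              · rintro ⟨⟨h1, h2⟩, h3⟩; exact ⟨a, by simp [h1], by omega, by omega⟩
              · rintro ⟨v, hv, h1, h2⟩; simp at hv; obtain ⟨ha, hb⟩ := hv; subst ha; subst hb
                exact ⟨⟨rfl, by omega⟩, by omega⟩),
      sorted_filter_eq ips (-1) x (fun v => (v, y)) (·.1) (fun _ => rfl) _
        (by intro p; cases p with | mk a b =>
              simp only [beq_iff_eq, Bool.and_eq_true, decide_eq_true_eq]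
              constructor
              · rintro ⟨⟨h1, h2⟩, h3⟩; exact ⟨a, by simp [h1], by omega, by omega⟩
              · rintro ⟨v, hv, h1, h2⟩; simp at hv; obtain ⟨ha, hb⟩ := hv; subst ha; subst hb
                exact ⟨⟨rfl, by omega⟩, by omega⟩)]
  rw [PySem.List.pyRange_neg_one_eq_reverse (y - 1) (-2),
      PySem.List.pyRange_neg_one_eq_reverse (x - 1) (-2)]
  simp only [show (-2 : Int) + 1 = -1 by ring, show y - 1 + 1 = y by ring,
    show x - 1 + 1 = x by ring, List.filter_reverse, List.map_reverse, List.append_assoc, List.nil_append]
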